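-- pv_equiv track=rewrite | github.com/malualamo/Puntuacion-Capitalizacion | utils/datautils.py | get_punct_start_labels_for_tokens
-- ===== SOURCE A (Python) =====
-- def get_punct_start_labels_for_tokens(labels_per_word, token_word_map):
--     labels = [0] * len(token_word_map)
--     word_to_token_idxs = {}
--     for token_idx, word_idx in enumerate(token_word_map):
--         if word_idx is not None:
--             word_to_token_idxs.setdefault(word_idx, []).append(token_idx)
--     for word_idx, token_idxs in word_to_token_idxs.items():
--         punct_label = labels_per_word[word_idx]
--         # Puntuacion inicial va en primer subtoken
--         labels[token_idxs[0]] = punct_label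
--     return labels
-- ===== SOURCE B (Python) =====
-- def get_punct_start_labels_for_tokens(labels_per_word, token_word_map):
--     labels = [0] * len(token_word_map)
--     seen = set()
--     for token_idx, word_idx in enumerate(token_word_map):
--         if word_idx is not None and word_idx not in seen:
--             labels[token_idx] = labels_per_word[word_idx]
--             seen.add(word_idx)
--     return labels
-- ===== Notes on version B (the rewrite author's own statement) =====
-- stated objective: simpler
-- what changed: A's two-phase build of a word-to-token-list dict followed by a second consuming loop is replaced by a single enumerate pass that writes each word's label at its first subtoken directly, tracking already-assigned words in a set; the intermediate dict of lists disappears.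
import Mathlib
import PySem

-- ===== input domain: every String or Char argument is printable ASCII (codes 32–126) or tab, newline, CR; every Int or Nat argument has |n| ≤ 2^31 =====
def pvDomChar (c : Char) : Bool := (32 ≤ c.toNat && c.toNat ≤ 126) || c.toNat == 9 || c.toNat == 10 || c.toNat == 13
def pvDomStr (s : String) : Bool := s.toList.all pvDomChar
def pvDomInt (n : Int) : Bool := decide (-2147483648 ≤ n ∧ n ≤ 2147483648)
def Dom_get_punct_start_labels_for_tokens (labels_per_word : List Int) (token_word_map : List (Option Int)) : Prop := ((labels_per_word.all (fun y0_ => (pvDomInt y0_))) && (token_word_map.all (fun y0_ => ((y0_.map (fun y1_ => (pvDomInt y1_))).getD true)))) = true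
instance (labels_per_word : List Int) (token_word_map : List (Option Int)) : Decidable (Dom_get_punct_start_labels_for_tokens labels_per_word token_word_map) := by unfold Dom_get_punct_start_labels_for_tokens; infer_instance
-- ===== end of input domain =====

-- B replaces A's build-then-consume dict of token lists by one enumerate pass with a seen-set — simpler, same O(n) cost.


-- ===== PORT A =====
-- labels_per_word[word_idx] is ported as pyGetD with default 0; Pre_ restricts to indices where
-- Python's lookup succeeds (elsewhere Python raises IndexError). token_idxs[0] is pyGetD at 0;
-- the lists in the dict are nonempty by construction, so it is exact.
def get_punct_start_labels_for_tokens (labels_per_word : List Int) (token_word_map : List (Option Int)) : List Int :=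
  let labels : List Int := List.replicate token_word_map.length 0
  let word_to_token_idxs : PySem.Dict Int (List Int) :=
    (PySem.List.enumerate token_word_map).foldl
      (fun d p =>
        match p.2 with
        | some word_idx => d.modify word_idx [] (fun l => l ++ [p.1])   -- setdefault(w, []).append(i)
        | none => d)
      PySem.Dict.empty
  word_to_token_idxs.items.foldl
    (fun labels q =>
      PySem.List.pySetD labels (PySem.List.pyGetD q.2 0 0) (PySem.List.pyGetD labels_per_word q.1 0))
    labels

-- ===== PORT B =====
def get_punct_start_labels_for_tokens_alt (labels_per_word : List Int) (token_word_map : List (Option Int)) : List Int :=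
  ((PySem.List.enumerate token_word_map).foldl
    (fun (st : List Int × PySem.Set Int) p =>
      match p.2 with
      | some word_idx =>
        if PySem.Set.contains st.2 word_idx then st
        else (PySem.List.pySetD st.1 p.1 (PySem.List.pyGetD labels_per_word word_idx 0),
              PySem.Set.add st.2 word_idx)
      | none => st)
    (List.replicate token_word_map.length 0, PySem.Set.empty)).1

-- ===== PRECONDITION & SPEC =====
-- Pre_: every word index occurring in token_word_map is a valid Python index into labels_per_word
-- (otherwise both A and B raise IndexError at labels_per_word[word_idx]).
def Pre_get_punct_start_labels_for_tokens (labels_per_word : List Int) (token_word_map : List (Option Int)) : Prop :=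
  token_word_map.all
    (fun o => match o with
      | none => true
      | some w => decide (PySem.Raise.InRange labels_per_word.length w)) = true
instance (labels_per_word : List Int) (token_word_map : List (Option Int)) : Decidable (Pre_get_punct_start_labels_for_tokens labels_per_word token_word_map) := by unfold Pre_get_punct_start_labels_for_tokens; infer_instance
def pvWitness_get_punct_start_labels_for_tokens : List Int × List (Option Int) :=
  ([5, 7], [some 0, some 0, none, some 1, some 0])

def Spec_get_punct_start_labels_for_tokens (labels_per_word : List Int) (token_word_map : List (Option Int)) (out : List Int) : Prop := out = get_punct_start_labels_for_tokens_alt labels_per_word token_word_map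
instance (labels_per_word : List Int) (token_word_map : List (Option Int)) (out : List Int) : Decidable (Spec_get_punct_start_labels_for_tokens labels_per_word token_word_map out) := by unfold Spec_get_punct_start_labels_for_tokens; infer_instance

-- ===== CLAIM (what is proved, stated in full; the proofs are below) =====
def Claim_equal_get_punct_start_labels_for_tokens : Prop := ∀ (labels_per_word : List Int) (token_word_map : List (Option Int)), Dom_get_punct_start_labels_for_tokens labels_per_word token_word_map → Pre_get_punct_start_labels_for_tokens labels_per_word token_word_map → Spec_get_punct_start_labels_for_tokens labels_per_word token_word_map (get_punct_start_labels_for_tokens labels_per_word token_word_map)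

-- ===== LEMMAS AND PROOFS =====

-- A's first-loop step, named for the proofs (definitionally the lambda in port A's first foldl).
def pvStepA (d : PySem.Dict Int (List Int)) (p : Int × Option Int) : PySem.Dict Int (List Int) :=
  match p.2 with
  | some word_idx => d.modify word_idx [] (fun l => l ++ [p.1])
  | none => d

-- A's second loop as a function of the dict (definitionally port A's second foldl).
def pvApply (labels_per_word : List Int) (d : PySem.Dict Int (List Int)) (labels : List Int) : List Int :=
  d.items.foldl
    (fun labels q =>
      PySem.List.pySetD labels (PySem.List.pyGetD q.2 0 0) (PySem.List.pyGetD labels_per_word q.1 0))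
    labels

-- B's step, named (definitionally the lambda in port B's foldl).
def pvStepB (labels_per_word : List Int) (st : List Int × PySem.Set Int) (p : Int × Option Int) : List Int × PySem.Set Int :=
  match p.2 with
  | some word_idx =>
    if PySem.Set.contains st.2 word_idx then st
    else (PySem.List.pySetD st.1 p.1 (PySem.List.pyGetD labels_per_word word_idx 0),
          PySem.Set.add st.2 word_idx)
  | none => st

lemma pvHead_append {xs ys : List Int} (h : xs ≠ []) (d : Int) :
    PySem.List.pyGetD (xs ++ ys) 0 d = PySem.List.pyGetD xs 0 d := by
  cases xs with
  | nil => exact absurd rfl h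
  | cons a t =>
    have h0 : (0:Int) ≤ (t.length : Int) + (ys.length : Int) := by positivity
    simp [PySem.List.pyGetD, PySem.List.pyGet?, PySem.List.pyIdx?, h0]

-- Main invariant: running B's loop from (A's second pass applied to d, keys of d) tracks
-- A's dict build followed by A's second pass.
lemma pvMain (labels_per_word : List Int) (l : List (Int × Option Int)) :
    ∀ (d : PySem.Dict Int (List Int)) (labels : List Int),
      d.keys.Nodup → (∀ q ∈ d.items, q.2 ≠ []) →
      l.foldl (pvStepB labels_per_word) (pvApply labels_per_word d labels, d.keys)
        = (pvApply labels_per_word (l.foldl pvStepA d) labels, (l.foldl pvStepA d).keys) := by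
  induction l with
  | nil => intro d labels _ _; simp
  | cons p rest ih =>
    intro d labels hnd hne
    obtain ⟨i, ow⟩ := p
    cases ow with
    | none => simpa [pvStepA, pvStepB] using ih d labels hnd hne
    | some w =>
      by_cases hc : d.contains w = true
      · -- word already in the dict: both sides leave their state unchanged
        have hmem : w ∈ d.keys := (PySem.Dict.contains_iff_mem_keys d w).mp hc
        have hkeys : (d.modify w [] (fun l => l ++ [i])).keys = d.keys := by
          rw [PySem.Dict.keys_modify, PySem.Dict.keys_insert_of_contains _ _ hc]
        have hitems : (d.modify w [] (fun l => l ++ [i])).items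
            = List.map (fun q => if (q.1 == w) = true then (w, d.getD w [] ++ [i]) else q) d.items := by
          simpa [PySem.Dict.modify] using
            PySem.Dict.items_insert_of_contains d (d.getD w [] ++ [i]) hc
        have happ : pvApply labels_per_word (d.modify w [] (fun l => l ++ [i])) labels
            = pvApply labels_per_word d labels := by
          unfold pvApply
          rw [hitems, List.foldl_map]
          refine PySem.List.foldl_congr_mem _ _ _ _ ?_
          intro acc q hq
          by_cases hqw : (q.1 == w) = true
          · have hq1 : q.1 = w := by simpa using hqw
            have hval : d.getD w [] = q.2 := by
              have : (q.1, q.2) ∈ d.items := by simpa using hq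
              rw [hq1] at this
              exact PySem.Dict.getD_of_mem_items d this hnd []
            have hne' : q.2 ≠ [] := hne q hq
            simp [hq1, ← hval, pvHead_append (hval ▸ hne')]
          · simp [hqw]
        have hne' : ∀ q ∈ (d.modify w [] (fun l => l ++ [i])).items, q.2 ≠ [] := by
          intro q hq
          rw [hitems] at hq
          rcases List.mem_map.mp hq with ⟨q', hq', hEq⟩
          by_cases hqw : (q'.1 == w) = true
          · simp [hqw] at hEq; rw [← hEq]; simp
          · simp [hqw] at hEq; exact hEq ▸ hne q' hq'
        have hnd' : (d.modify w [] (fun l => l ++ [i])).keys.Nodup := hkeys ▸ hnd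
        have := ih (d.modify w [] (fun l => l ++ [i])) labels hnd' hne'
        rw [happ, hkeys] at this
        simpa [pvStepA, pvStepB, hmem] using this
      · -- first occurrence of this word
        have hcf : d.contains w = false := by simpa using hc
        have hnm : w ∉ d.keys := fun h => hc ((PySem.Dict.contains_iff_mem_keys d w).mpr h)
        have hmod : d.modify w [] (fun l => l ++ [i]) = d.insert w [i] := by
          simp [PySem.Dict.modify, PySem.Dict.getD_of_not_contains d [] hcf]
        have hitems : (d.insert w [i]).items = d.items ++ [(w, [i])] :=
          PySem.Dict.items_insert_of_not_contains d [i] hcf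
        have hkeys : (d.insert w [i]).keys = d.keys ++ [w] :=
          PySem.Dict.keys_insert_of_not_contains d [i] hcf
        have happ : pvApply labels_per_word (d.insert w [i]) labels
            = PySem.List.pySetD (pvApply labels_per_word d labels) i
                (PySem.List.pyGetD labels_per_word w 0) := by
          unfold pvApply
          rw [hitems, List.foldl_append]
          simp [PySem.List.pyGetD, PySem.List.pyGet?, PySem.List.pyIdx?]
        have hne' : ∀ q ∈ (d.insert w [i]).items, q.2 ≠ [] := by
          intro q hq
          rw [hitems] at hq
          rcases List.mem_append.mp hq with h | h
          · exact hne q h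
          · have := List.mem_singleton.mp h
            rw [this]; simp
        have hnd' : (d.insert w [i]).keys.Nodup := by
          rw [hkeys]
          simpa [List.nodup_append, hnd] using fun a ha (hEq : a = w) => hnm (hEq ▸ ha)
        have := ih (d.insert w [i]) labels hnd' hne'
        rw [happ, hkeys] at this
        have hadd : PySem.Set.add d.keys w = d.keys ++ [w] := PySem.Set.add_of_not_mem hnm
        simpa [pvStepA, pvStepB, hnm, hmod, hadd] using this

-- ===== VERDICT (by name: the statement is the Claim_ definition above) =====
theorem get_punct_start_labels_for_tokens_spec : Claim_equal_get_punct_start_labels_for_tokens := by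
  intro labels_per_word token_word_map _ _
  show get_punct_start_labels_for_tokens labels_per_word token_word_map
      = get_punct_start_labels_for_tokens_alt labels_per_word token_word_map
  have hA : pvApply labels_per_word PySem.Dict.empty (List.replicate token_word_map.length 0)
      = List.replicate token_word_map.length 0 := by
    simp [pvApply, PySem.Dict.empty]
  have h := pvMain labels_per_word (PySem.List.enumerate token_word_map)
    PySem.Dict.empty (List.replicate token_word_map.length 0)
    (by simp [PySem.Dict.keys_empty]) (by simp [PySem.Dict.empty])
  rw [hA] at h
  have hAeq : get_punct_start_labels_for_tokens labels_per_word token_word_map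
      = pvApply labels_per_word
          ((PySem.List.enumerate token_word_map).foldl pvStepA PySem.Dict.empty)
          (List.replicate token_word_map.length 0) := rfl
  have hBeq : get_punct_start_labels_for_tokens_alt labels_per_word token_word_map
      = ((PySem.List.enumerate token_word_map).foldl (pvStepB labels_per_word)
          (List.replicate token_word_map.length 0,
           PySem.Dict.keys (PySem.Dict.empty : PySem.Dict Int (List Int)))).1 := rfl
  rw [hAeq, hBeq, h]
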